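-- pv_equiv track=rewrite | github.com/pypi-data/pypi-mirror-259 | packages/py2docfx/py2docfx-0.1.1.dev1631538-py3-none-any.whl/py2docfx/docfx_yaml/process_doctree.py | _refact_example_in_module_summary
-- ===== SOURCE A (Python) =====
-- def _refact_example_in_module_summary(lines):
--     new_lines = []
--     block_lines = []
--     example_block_flag = False
--     for line in lines:
--         if line.startswith('.. admonition:: Example'):
--             example_block_flag = True
--             line = '### Example\n\n'
--             new_lines.append(line)
--         elif example_block_flag and len(line) != 0 and not line.startswith('   '):
--             example_block_flag = False
--             new_lines.append(''.join(block_lines))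
--             new_lines.append(line)
--             block_lines[:] = []
--         elif example_block_flag:
--             if line == '   ':  # origianl line is blank line ('\n').
--                 line = '\n'  # after outer ['\n'.join] operation,
--                 # this '\n' will be appended to previous line then. BINGO!
--             elif line.startswith('   '):
--                 # will be indented by 4 spaces according to yml block syntax.
--                 # https://learnxinyminutes.com/docs/yaml/
--                 line = ' ' + line + '\n'
--             block_lines.append(line)
--
--         else:
--             new_lines.append(line)
--     return new_lines
-- ===== SOURCE B (Python) =====
-- def _refact_example_in_module_summary(lines):
--     out = []
--     n = len(lines)
--     i = 0
--     while i < n: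
--         line = lines[i]
--         i += 1
--         if not line.startswith('.. admonition:: Example'):
--             out.append(line)
--             continue
--         out.append('### Example\n\n')
--         block = []
--         while i < n:
--             cur = lines[i]
--             i += 1
--             if cur.startswith('.. admonition:: Example'):
--                 out.append('### Example\n\n')
--             elif cur == '   ':
--                 block.append('\n')
--             elif cur.startswith('   '):
--                 block.append(' ' + cur + '\n')
--             elif len(cur) == 0:
--                 block.append(cur)
--             else:
--                 # closing line: flush the block, emit it, resume scanning
--                 out.append(''.join(block))
--                 out.append(cur)
--                 break
--         # inner loop exhausted the input: the trailing block is dropped (as in A)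
--     return out
-- ===== Notes on version B (the rewrite author's own statement) =====
-- stated objective: alternative
-- what changed: Replaces A's single pass driven by an example_block_flag and a persistent block_lines buffer with an outer copy loop plus a dedicated inner loop that consumes one example block (flushing it on the closing line, dropping it at end of input).
import Mathlib
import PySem

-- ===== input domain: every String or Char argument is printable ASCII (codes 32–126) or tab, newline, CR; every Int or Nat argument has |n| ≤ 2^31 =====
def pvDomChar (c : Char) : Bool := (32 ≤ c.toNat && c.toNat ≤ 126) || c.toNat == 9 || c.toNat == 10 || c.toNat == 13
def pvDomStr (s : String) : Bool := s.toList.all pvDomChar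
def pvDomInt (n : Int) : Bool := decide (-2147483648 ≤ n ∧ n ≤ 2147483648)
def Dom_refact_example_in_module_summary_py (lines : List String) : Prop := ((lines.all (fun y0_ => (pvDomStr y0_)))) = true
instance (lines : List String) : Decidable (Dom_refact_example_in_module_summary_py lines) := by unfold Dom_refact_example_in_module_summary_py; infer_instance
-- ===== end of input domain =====

-- B restructures A's single flag-driven loop into an index-free outer scan with a dedicated
-- inner loop that collects one example block; same return value (alternative decomposition).

-- ===== PORT A =====
-- state = (new_lines, block_lines, example_block_flag)
def pvAStep (st : List String × List String × Bool) (line : String) :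
    List String × List String × Bool :=
  let nl := st.1; let bl := st.2.1; let flag := st.2.2
  if PySem.Str.startswith line ".. admonition:: Example" then
    (nl ++ ["### Example\n\n"], bl, true)
  else if flag && (PySem.Str.len line != 0) && !(PySem.Str.startswith line "   ") then
    (nl ++ [PySem.Str.join "" bl, line], [], false)
  else if flag then
    let line' := if line = "   " then "\n"
                 else if PySem.Str.startswith line "   " then " " ++ line ++ "\n"
                 else line
    (nl, bl ++ [line'], flag)
  else
    (nl ++ [line], bl, flag)

def refact_example_in_module_summary_py (lines : List String) : List String :=
  (lines.foldl pvAStep ([], [], false)).1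

-- ===== PORT B =====
mutual
-- outer loop of Source B: copy lines until an admonition header starts a block
def pvBOuter : List String → List String
  | [] => []
  | l :: rest =>
    if PySem.Str.startswith l ".. admonition:: Example" then
      "### Example\n\n" :: pvBInner rest []
    else
      l :: pvBOuter rest
termination_by xs => xs.length
-- inner loop of Source B: collect the block, flush it on the closing line, drop it at EOF
def pvBInner : List String → List String → List String
  | [], _ => []
  | c :: rest, block =>
    if PySem.Str.startswith c ".. admonition:: Example" then
      "### Example\n\n" :: pvBInner rest block
    else if c = "   " then
      pvBInner rest (block ++ ["\n"])
    else if PySem.Str.startswith c "   " then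
      pvBInner rest (block ++ [" " ++ c ++ "\n"])
    else if PySem.Str.len c == 0 then
      pvBInner rest (block ++ [c])
    else
      PySem.Str.join "" block :: c :: pvBOuter rest
termination_by xs _ => xs.length
end

def refact_example_in_module_summary_py_alt (lines : List String) : List String :=
  pvBOuter lines

-- ===== PRECONDITION & SPEC =====
def Spec_refact_example_in_module_summary_py (lines : List String) (out : List String) : Prop := out = refact_example_in_module_summary_py_alt lines
instance (lines : List String) (out : List String) : Decidable (Spec_refact_example_in_module_summary_py lines out) := by unfold Spec_refact_example_in_module_summary_py; infer_instance

-- ===== CLAIM (what is proved, stated in full; the proofs are below) =====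
def Claim_equal_refact_example_in_module_summary_py : Prop := ∀ (lines : List String), Dom_refact_example_in_module_summary_py lines → Spec_refact_example_in_module_summary_py lines (refact_example_in_module_summary_py lines)

-- ===== LEMMAS AND PROOFS =====

-- joint loop invariant: A's fold from (nl, [], false) computes nl ++ pvBOuter, and
-- from (nl, bl, true) computes nl ++ pvBInner bl
lemma pv_key (lines : List String) :
    (∀ nl, (List.foldl pvAStep (nl, [], false) lines).1 = nl ++ pvBOuter lines) ∧
    (∀ nl bl, (List.foldl pvAStep (nl, bl, true) lines).1 = nl ++ pvBInner lines bl) := by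
  induction lines with
  | nil => simp [pvBOuter, pvBInner]
  | cons l rest ih =>
    constructor
    · intro nl
      simp only [List.foldl, pvAStep, pvBOuter, Bool.false_and, Bool.false_eq_true, if_false]
      split_ifs with h
      · rw [ih.2]; simp
      · rw [ih.1]; simp
    · intro nl bl
      simp only [List.foldl, pvAStep, pvBInner, Bool.true_and]
      split_ifs with h1 h2 h3 h4 h5 h6 h7 h8
      all_goals first
        | (exfalso; simp_all [PySem.Chars.startswith]; done)
        | simp_all

-- ===== VERDICT (by name: the statement is the Claim_ definition above) =====
theorem refact_example_in_module_summary_py_spec : Claim_equal_refact_example_in_module_summary_py := by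
  intro lines _
  unfold Spec_refact_example_in_module_summary_py refact_example_in_module_summary_py refact_example_in_module_summary_py_alt
  simpa using (pv_key lines).1 []
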